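-- pv_equiv track=rewrite | github.com/fields1work/openclaw-workspace | smart_fetcher.py | format_for_analysis
-- ===== SOURCE A (Python) =====
-- def format_for_analysis(text):
--     """Clean up fetched article text for analysis"""
--     # Remove security notices
--     lines = text.split('\n')
--     cleaned = []
--     skip = False
--
--     for line in lines:
--         # Skip security headers
--         if 'SECURITY NOTICE' in line or 'EXTERNAL_UNTRUSTED' in line:
--             skip = True
--             continue
--         if skip and line.strip() == '---':
--             skip = False
--             continue
--         if skip:
--             continue
--         cleaned.append(line)
--
--     return '\n'.join(cleaned)
-- ===== SOURCE B (Python) =====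
-- def format_for_analysis(text):
--     """Clean up fetched article text for analysis"""
--     # Outer scan over an iterator; a marker line triggers an inner loop that
--     # consumes the block up to (and including) its '---' terminator.
--     out = []
--     it = iter(text.split('\n'))
--     for line in it:
--         if 'SECURITY NOTICE' in line or 'EXTERNAL_UNTRUSTED' in line:
--             for inner in it:
--                 if inner.strip() == '---':
--                     break
--         else:
--             out.append(line)
--     return '\n'.join(out)
-- ===== Notes on version B (the rewrite author's own statement) =====
-- stated objective: alternative
-- what changed: Replaces A's single pass with a persistent skip flag by an outer scan over a line iterator whose marker case runs an inner loop that consumes the block up to and including its terminator line.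
import Mathlib
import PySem

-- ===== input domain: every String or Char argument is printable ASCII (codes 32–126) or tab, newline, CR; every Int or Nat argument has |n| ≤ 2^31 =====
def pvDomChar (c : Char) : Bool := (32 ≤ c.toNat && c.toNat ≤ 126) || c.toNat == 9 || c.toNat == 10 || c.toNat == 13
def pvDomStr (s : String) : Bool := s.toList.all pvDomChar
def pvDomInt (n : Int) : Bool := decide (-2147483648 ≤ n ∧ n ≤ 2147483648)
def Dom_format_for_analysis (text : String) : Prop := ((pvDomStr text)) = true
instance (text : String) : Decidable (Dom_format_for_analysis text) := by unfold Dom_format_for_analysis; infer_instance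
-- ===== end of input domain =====

-- B replaces A's persistent skip flag by an outer scan with an inner block-consuming loop (objective: simpler decomposition, same cost).

-- ===== PORT A =====
def format_for_analysis (text : String) : String :=
  let lines := ((PySem.Str.split? text "\n").getD [])
  let res := lines.foldl (fun (st : List String × Bool) line =>
    if PySem.Str.isIn "SECURITY NOTICE" line || PySem.Str.isIn "EXTERNAL_UNTRUSTED" line then
      (st.1, true)
    else if st.2 && (PySem.Str.strip line == "---") then
      (st.1, false)
    else if st.2 then
      st
    else
      (st.1 ++ [line], st.2)) ([], false)
  PySem.Str.join "\n" res.1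

-- ===== PORT B =====
-- inner loop: discard lines until a line with strip() == '---' is consumed (or end)
def pvConsume : List String → List String
  | [] => []
  | l :: rest => if PySem.Str.strip l == "---" then rest else pvConsume rest

theorem pvConsume_length_le (ls : List String) : (pvConsume ls).length ≤ ls.length := by
  induction ls with
  | nil => simp [pvConsume]
  | cons l rest ih =>
    simp only [pvConsume]
    split
    · simp
    · exact Nat.le_succ_of_le ih

-- outer scan: keep ordinary lines, hand blocks to pvConsume
def pvScan : List String → List String
  | [] => []
  | l :: rest =>
    if PySem.Str.isIn "SECURITY NOTICE" l || PySem.Str.isIn "EXTERNAL_UNTRUSTED" l then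
      pvScan (pvConsume rest)
    else
      l :: pvScan rest
termination_by ls => ls.length
decreasing_by
  · exact Nat.lt_succ_of_le (pvConsume_length_le rest)
  · simp

def format_for_analysis_alt (text : String) : String :=
  PySem.Str.join "\n" (pvScan (((PySem.Str.split? text "\n").getD [])))

-- ===== PRECONDITION & SPEC =====
def Spec_format_for_analysis (text : String) (out : String) : Prop := out = format_for_analysis_alt text
instance (text : String) (out : String) : Decidable (Spec_format_for_analysis text out) := by unfold Spec_format_for_analysis; infer_instance

-- ===== CLAIM (what is proved, stated in full; the proofs are below) =====
def Claim_equal_format_for_analysis : Prop := ∀ (text : String), Dom_format_for_analysis text → Spec_format_for_analysis text (format_for_analysis text)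

-- ===== LEMMAS AND PROOFS =====

-- every character of a string is in its strip or is whitespace
theorem mem_rstrip_or_space (ds : List Char) (c : Char) (h : c ∈ ds) :
    c ∈ PySem.Chars.rstrip ds ∨ PySem.Chars.isspace c = true := by
  unfold PySem.Chars.rstrip
  have h' : c ∈ ds.reverse := List.mem_reverse.mpr h
  rw [← List.takeWhile_append_dropWhile (p := PySem.Chars.isspace) (l := ds.reverse)] at h'
  rcases List.mem_append.mp h' with h1 | h2
  · exact Or.inr (List.mem_takeWhile_imp h1)
  · exact Or.inl (List.mem_reverse.mpr h2)

theorem mem_strip_or_space (cs : List Char) (c : Char) (h : c ∈ cs) :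
    c ∈ PySem.Chars.strip cs ∨ PySem.Chars.isspace c = true := by
  unfold PySem.Chars.strip PySem.Chars.lstrip
  rw [← List.takeWhile_append_dropWhile (p := PySem.Chars.isspace) (l := cs)] at h
  rcases List.mem_append.mp h with h1 | h2
  · exact Or.inr (List.mem_takeWhile_imp h1)
  · exact mem_rstrip_or_space _ _ h2

-- a line containing a marker cannot strip to "---"
theorem marker_not_dashes (l : String)
    (h : PySem.Str.isIn "SECURITY NOTICE" l = true ∨ PySem.Str.isIn "EXTERNAL_UNTRUSTED" l = true) :
    (PySem.Str.strip l == "---") = false := by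
  by_contra hne
  have heq : PySem.Str.strip l = "---" := by
    cases hb : (PySem.Str.strip l == "---") with
    | false => exact absurd hb hne
    | true => exact eq_of_beq hb
  have htl : PySem.Chars.strip l.toList = ['-', '-', '-'] := by
    have := PySem.Str.toList_strip l
    rw [heq] at this
    exact this.symm
  rcases h with h | h
  · have hinf := (PySem.Str.isIn_iff_infix _ _).mp h
    have hS : 'S' ∈ l.toList := hinf.subset (by decide)
    rcases mem_strip_or_space l.toList 'S' hS with h' | h'
    · rw [htl] at h'; simp at h'
    · revert h'; decide
  · have hinf := (PySem.Str.isIn_iff_infix _ _).mp h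
    have hE : 'E' ∈ l.toList := hinf.subset (by decide)
    rcases mem_strip_or_space l.toList 'E' hE with h' | h'
    · rw [htl] at h'; simp at h'
    · revert h'; decide

-- the core correspondence between A's flagged fold and B's scan/consume pair
theorem fold_eq_scan (n : Nat) : ∀ (ls : List String), ls.length ≤ n → ∀ (acc : List String),
    (ls.foldl (fun (st : List String × Bool) line =>
      if PySem.Str.isIn "SECURITY NOTICE" line || PySem.Str.isIn "EXTERNAL_UNTRUSTED" line then
        (st.1, true)
      else if st.2 && (PySem.Str.strip line == "---") then
        (st.1, false)
      else if st.2 then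
        st
      else
        (st.1 ++ [line], st.2)) (acc, false)).1 = acc ++ pvScan ls ∧
    (ls.foldl (fun (st : List String × Bool) line =>
      if PySem.Str.isIn "SECURITY NOTICE" line || PySem.Str.isIn "EXTERNAL_UNTRUSTED" line then
        (st.1, true)
      else if st.2 && (PySem.Str.strip line == "---") then
        (st.1, false)
      else if st.2 then
        st
      else
        (st.1 ++ [line], st.2)) (acc, true)).1 = acc ++ pvScan (pvConsume ls) := by
  induction n with
  | zero =>
    intro ls hls acc
    have : ls = [] := List.eq_nil_of_length_eq_zero (Nat.le_zero.mp hls)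
    subst this
    simp [pvScan, pvConsume]
  | succ n ih =>
    intro ls hls acc
    cases ls with
    | nil => simp [pvScan, pvConsume]
    | cons l rest =>
      have hrest : rest.length ≤ n := Nat.lt_succ_iff.mp (Nat.lt_of_lt_of_le (by simp) hls)
      by_cases hm : (PySem.Str.isIn "SECURITY NOTICE" l || PySem.Str.isIn "EXTERNAL_UNTRUSTED" l) = true
      · have hnd : (PySem.Str.strip l == "---") = false :=
          marker_not_dashes l (by simpa using hm)
        constructor
        · simp only [List.foldl_cons, hm, if_true]
          rw [(ih rest hrest acc).2]
          conv_rhs => rw [pvScan]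
          rw [if_pos hm]
        · simp only [List.foldl_cons, hm, if_true]
          rw [(ih rest hrest acc).2]
          conv_rhs => rw [pvConsume]
          rw [if_neg (by simp [hnd])]
      · rw [Bool.not_eq_true] at hm
        constructor
        · simp only [List.foldl_cons, hm, Bool.false_and, if_false, Bool.false_eq_true]
          rw [(ih rest hrest (acc ++ [l])).1]
          conv_rhs => rw [pvScan]
          rw [if_neg (by rw [hm]; simp)]
          simp
        · by_cases hd : (PySem.Str.strip l == "---") = true
          · simp only [List.foldl_cons, hm, hd, Bool.true_and, if_true, Bool.false_eq_true, if_false]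
            rw [(ih rest hrest acc).1]
            conv_rhs => rw [pvConsume]
            rw [if_pos hd]
          · rw [Bool.not_eq_true] at hd
            simp only [List.foldl_cons, hm, hd, Bool.true_and, Bool.false_eq_true, if_false, if_true]
            rw [(ih rest hrest acc).2]
            conv_rhs => rw [pvConsume]
            rw [if_neg (by simp [hd])]

-- ===== VERDICT (by name: the statement is the Claim_ definition above) =====
theorem format_for_analysis_spec : Claim_equal_format_for_analysis := by
  intro text _
  unfold Spec_format_for_analysis format_for_analysis format_for_analysis_alt
  have h := (fold_eq_scan (((PySem.Str.split? text "\n").getD [])).length (((PySem.Str.split? text "\n").getD [])) le_rfl []).1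
  simp only [List.nil_append] at h
  simp only [h]
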